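-- pv_equiv track=rewrite | github.com/EwboJ/SNN | scripts/derive_straight_keep_dataset.py | cap_settled_frames
-- ===== SOURCE A (Python) =====
-- def cap_settled_frames(frames, phases, max_settled_frames):
--     """
--     限制 Settled 阶段的最大帧数。
--
--     保留最后 max_settled_frames 帧的 Settled，
--     多余的前面 Settled 帧丢弃。
--
--     Returns:
--         (new_frames, new_phases): 裁剪后的帧和阶段
--     """
--     # 找到所有 Settled 帧的索引
--     settled_indices = [i for i, p in enumerate(phases) if p == 'Settled']
--
--     if len(settled_indices) <= max_settled_frames:
--         return frames, phases
--
--     # 保留最后 max_settled_frames 个 Settled 帧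
--     keep_settled = set(settled_indices[-max_settled_frames:])
--     drop_settled = set(settled_indices[:-max_settled_frames])
--
--     new_frames = []
--     new_phases = []
--     for i in range(len(frames)):
--         if i in drop_settled:
--             continue
--         new_frames.append(frames[i])
--         new_phases.append(phases[i])
--
--     return new_frames, new_phases
-- ===== SOURCE B (Python) =====
-- def _cut_after(phases, num_drop):
--     """Index just past the num_drop-th 'Settled' entry of phases (len(phases) if fewer)."""
--     seen = 0
--     for j, p in enumerate(phases):
--         if p == 'Settled':
--             seen += 1
--             if seen == num_drop:
--                 return j + 1
--     return len(phases)
--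
--
-- def cap_settled_frames(frames, phases, max_settled_frames):
--     """Cap the number of 'Settled' frames, keeping only the last max_settled_frames of them.
--
--     Instead of copying frame by frame, find the boundary just after the last dropped
--     'Settled' frame: before it, keep only non-'Settled' frames; from it on, keep everything.
--     """
--     num_drop = phases.count('Settled') - max_settled_frames
--     if num_drop <= 0:
--         return frames, phases
--     cut = _cut_after(phases, num_drop)
--     head = [(f, p) for f, p in zip(frames[:cut], phases) if p != 'Settled']
--     return ([f for f, _ in head] + frames[cut:],
--             [p for _, p in head] + phases[cut:len(frames)])
-- ===== Notes on version B (the rewrite author's own statement) =====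
-- stated objective: alternative
-- what changed: B replaces A's index machinery (collect all Settled indices, two slices, two sets, per-frame membership-tested copy loop) by locating the boundary just past the last dropped Settled frame, then building the result as filter-of-prefix plus untouched slice suffixes.
-- intended difference: When max_settled_frames == 0 and a Settled frame exists among the first len(frames) positions, A's slice settled_indices[:-0] is empty so A drops nothing and returns every frame; B drops all Settled frames, which is the intended cap of zero. — e.g. on cap_settled_frames([1, 2], ["Settled", "Go"], 0): A returns ([1, 2], ["Settled", "Go"]), B returns ([2], ["Go"])
-- outside the precondition, e.g. on cap_settled_frames([1, 2], ['Settled', 'Settled'], -1): A returns ([2], ['Settled']), B returns ([], [])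
import Mathlib
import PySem

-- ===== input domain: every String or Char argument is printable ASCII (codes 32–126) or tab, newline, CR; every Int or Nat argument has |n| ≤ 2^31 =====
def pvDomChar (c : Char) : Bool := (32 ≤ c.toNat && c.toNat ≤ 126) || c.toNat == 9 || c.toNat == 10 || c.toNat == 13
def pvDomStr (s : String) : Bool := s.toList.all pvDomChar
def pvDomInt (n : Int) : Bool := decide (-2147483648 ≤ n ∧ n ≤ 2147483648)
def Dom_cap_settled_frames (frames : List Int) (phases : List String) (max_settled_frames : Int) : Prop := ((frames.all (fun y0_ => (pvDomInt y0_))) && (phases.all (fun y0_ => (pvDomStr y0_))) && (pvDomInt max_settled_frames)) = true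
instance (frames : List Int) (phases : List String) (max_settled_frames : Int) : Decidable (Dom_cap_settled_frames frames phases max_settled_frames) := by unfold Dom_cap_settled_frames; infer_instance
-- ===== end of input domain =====

-- B caps Settled frames by locating the boundary just after the last dropped Settled frame, then
-- filtering the prefix and keeping the untouched suffix via slices — instead of A's settled-index list,
-- index sets and per-frame copy loop; A's `indices[:-0]` slip at max_settled_frames == 0 (drops nothing)
-- is recorded as an intended difference D_.


-- ===== PORT A =====
def cap_settled_frames (frames : List Int) (phases : List String) (max_settled_frames : Int) : List Int × List String :=
  let settled_indices : List Int :=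
    (PySem.List.enumerate phases 0).filterMap (fun ip => if ip.2 = "Settled" then some ip.1 else none)
  if (settled_indices.length : Int) ≤ max_settled_frames then (frames, phases)
  else
    let _keep_settled : PySem.Set Int :=
      PySem.Set.ofList (PySem.List.slice settled_indices (some (-max_settled_frames)) none)
    let drop_settled : PySem.Set Int :=
      PySem.Set.ofList (PySem.List.slice settled_indices none (some (-max_settled_frames)))
    (PySem.List.pyRange 0 (frames.length : Int) 1).foldl
      (fun st i =>
        if PySem.Set.contains drop_settled i then st
        else (st.1 ++ [PySem.List.pyGetD frames i 0], st.2 ++ [PySem.List.pyGetD phases i ""]))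
      ([], [])

-- ===== PORT B =====
-- _cut_after(phases, num_drop): the for-loop with early return becomes structural recursion
-- carrying the running index j and the seen-counter.
def cutAfterGo (nd : Int) : List String → Int → Int → Int
  | [], _, j => j
  | p :: t, seen, j =>
      if p = "Settled" then
        if seen + 1 = nd then j + 1 else cutAfterGo nd t (seen + 1) (j + 1)
      else cutAfterGo nd t seen (j + 1)

def cap_settled_frames_alt (frames : List Int) (phases : List String) (max_settled_frames : Int) : List Int × List String :=
  let num_drop : Int := (PySem.List.count phases "Settled" : Int) - max_settled_frames
  if num_drop ≤ 0 then (frames, phases)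
  else
    let cut : Int := cutAfterGo num_drop phases 0 0
    let head : List (Int × String) :=
      ((PySem.List.slice frames none (some cut)).zip phases).filter (fun fp => !(fp.2 == "Settled"))
    (head.map Prod.fst ++ PySem.List.slice frames (some cut) none,
     head.map Prod.snd ++ PySem.List.slice phases (some cut) (some (frames.length : Int)))

-- ===== PRECONDITION & SPEC =====
-- Pre_ excludes (a) negative caps, where A's double-negative slice arithmetic keeps an accidental backwards
-- selection (outside the natural domain of a frame cap), and (b) frames longer than phases with more Settled
-- frames than the cap, where A raises IndexError on phases[i].
def Pre_cap_settled_frames (frames : List Int) (phases : List String) (max_settled_frames : Int) : Prop :=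
  0 ≤ max_settled_frames ∧
    (frames.length ≤ phases.length ∨ (phases.count "Settled" : Int) ≤ max_settled_frames)
instance (frames : List Int) (phases : List String) (max_settled_frames : Int) : Decidable (Pre_cap_settled_frames frames phases max_settled_frames) := by unfold Pre_cap_settled_frames; infer_instance

def pvWitness_cap_settled_frames : List Int × List String × Int :=
  ([1, 2, 3], ["Settled", "Go", "Settled"], 1)

-- When max_settled_frames = 0 and a Settled frame exists among the first frames.length positions, A's slice
-- settled_indices[:-0] is empty so A drops nothing and returns every frame; B drops all Settled frames,
-- which is the intended cap of zero.
def D_cap_settled_frames (frames : List Int) (phases : List String) (max_settled_frames : Int) : Prop :=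
  max_settled_frames = 0 ∧ 0 < (phases.take frames.length).count "Settled"
instance (frames : List Int) (phases : List String) (max_settled_frames : Int) : Decidable (D_cap_settled_frames frames phases max_settled_frames) := by unfold D_cap_settled_frames; infer_instance

def Spec_cap_settled_frames (frames : List Int) (phases : List String) (max_settled_frames : Int) (out : List Int × List String) : Prop := ¬ D_cap_settled_frames frames phases max_settled_frames → out = cap_settled_frames_alt frames phases max_settled_frames
instance (frames : List Int) (phases : List String) (max_settled_frames : Int) (out : List Int × List String) : Decidable (Spec_cap_settled_frames frames phases max_settled_frames out) := by unfold Spec_cap_settled_frames; infer_instance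

def pvDiffWitness_cap_settled_frames : List Int × List String × Int :=
  ([1, 2], ["Settled", "Go"], 0)
def pvDiffWitnessOut_cap_settled_frames : (List Int × List String) × (List Int × List String) :=
  (([1, 2], ["Settled", "Go"]), ([2], ["Go"]))

-- ===== CLAIM (what is proved, stated in full; the proofs are below) =====
def Claim_unchanged_cap_settled_frames : Prop := ∀ (frames : List Int) (phases : List String) (max_settled_frames : Int), Dom_cap_settled_frames frames phases max_settled_frames → Pre_cap_settled_frames frames phases max_settled_frames → Spec_cap_settled_frames frames phases max_settled_frames (cap_settled_frames frames phases max_settled_frames)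
def Claim_changed_cap_settled_frames : Prop := Dom_cap_settled_frames (pvDiffWitness_cap_settled_frames.1) (pvDiffWitness_cap_settled_frames.2.1) (pvDiffWitness_cap_settled_frames.2.2) ∧ Pre_cap_settled_frames (pvDiffWitness_cap_settled_frames.1) (pvDiffWitness_cap_settled_frames.2.1) (pvDiffWitness_cap_settled_frames.2.2) ∧ D_cap_settled_frames (pvDiffWitness_cap_settled_frames.1) (pvDiffWitness_cap_settled_frames.2.1) (pvDiffWitness_cap_settled_frames.2.2) ∧ cap_settled_frames (pvDiffWitness_cap_settled_frames.1) (pvDiffWitness_cap_settled_frames.2.1) (pvDiffWitness_cap_settled_frames.2.2) = pvDiffWitnessOut_cap_settled_frames.1 ∧ cap_settled_frames_alt (pvDiffWitness_cap_settled_frames.1) (pvDiffWitness_cap_settled_frames.2.1) (pvDiffWitness_cap_settled_frames.2.2) = pvDiffWitnessOut_cap_settled_frames.2 ∧ pvDiffWitnessOut_cap_settled_frames.1 ≠ pvDiffWitnessOut_cap_settled_frames.2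
def Claim_exact_cap_settled_frames : Prop := ∀ (frames : List Int) (phases : List String) (max_settled_frames : Int), Dom_cap_settled_frames frames phases max_settled_frames → Pre_cap_settled_frames frames phases max_settled_frames → D_cap_settled_frames frames phases max_settled_frames → cap_settled_frames frames phases max_settled_frames ≠ cap_settled_frames_alt frames phases max_settled_frames

-- ===== LEMMAS AND PROOFS =====

-- A's settled-index comprehension, named for the proofs (definitionally the port's expression).
def settledIdx (l : List String) (s : Int) : List Int :=
  (PySem.List.enumerate l s).filterMap (fun ip => if ip.2 = "Settled" then some ip.1 else none)

-- A's loop step, named for the proofs (definitionally the port's lambda).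
def stepA (frames : List Int) (phases : List String) (dropL : List Int)
    (st : List Int × List String) (i : Int) : List Int × List String :=
  if PySem.Set.contains (PySem.Set.ofList dropL) i then st
  else (st.1 ++ [PySem.List.pyGetD frames i 0], st.2 ++ [PySem.List.pyGetD phases i ""])

theorem portA_eq (frames : List Int) (phases : List String) (mx : Int) :
    cap_settled_frames frames phases mx =
      if ((settledIdx phases 0).length : Int) ≤ mx then (frames, phases)
      else (PySem.List.pyRange 0 (frames.length : Int) 1).foldl
        (stepA frames phases (PySem.List.slice (settledIdx phases 0) none (some (-mx)))) ([], []) := rfl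

theorem portB_eq (frames : List Int) (phases : List String) (mx : Int) :
    cap_settled_frames_alt frames phases mx =
      if ((PySem.List.count phases "Settled" : Nat) : Int) - mx ≤ 0 then (frames, phases)
      else
        (((((PySem.List.slice frames none (some (cutAfterGo (((PySem.List.count phases "Settled" : Nat) : Int) - mx) phases 0 0))).zip phases).filter (fun fp => !(fp.2 == "Settled"))).map Prod.fst)
            ++ PySem.List.slice frames (some (cutAfterGo (((PySem.List.count phases "Settled" : Nat) : Int) - mx) phases 0 0)) none,
         (((((PySem.List.slice frames none (some (cutAfterGo (((PySem.List.count phases "Settled" : Nat) : Int) - mx) phases 0 0))).zip phases).filter (fun fp => !(fp.2 == "Settled"))).map Prod.snd)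
            ++ PySem.List.slice phases (some (cutAfterGo (((PySem.List.count phases "Settled" : Nat) : Int) - mx) phases 0 0)) (some (frames.length : Int)))) := rfl

theorem settledIdx_cons (p : String) (l : List String) (s : Int) :
    settledIdx (p :: l) s =
      if p = "Settled" then s :: settledIdx l (s + 1) else settledIdx l (s + 1) := by
  by_cases hp : p = "Settled" <;>
    simp [settledIdx, PySem.List.enumerate_cons, hp]

theorem le_of_mem_settledIdx (l : List String) (s x : Int) (hx : x ∈ settledIdx l s) : s ≤ x := by
  induction l generalizing s with
  | nil => simp [settledIdx, PySem.List.enumerate_nil] at hx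
  | cons p t ih =>
    rw [settledIdx_cons] at hx
    split at hx
    · rcases List.mem_cons.1 hx with h | h
      · omega
      · have := ih (s + 1) h; omega
    · have := ih (s + 1) hx; omega

theorem length_settledIdx (l : List String) (s : Int) :
    (settledIdx l s).length = l.count "Settled" := by
  induction l generalizing s with
  | nil => simp [settledIdx, PySem.List.enumerate_nil]
  | cons p t ih =>
    rw [settledIdx_cons]
    by_cases hp : p = "Settled" <;> simp [hp, ih]

theorem mem_take_settledIdx (l : List String) (s : Int) (k i : Nat) (hi : i < l.length) :
    ((s + (i : Int)) ∈ (settledIdx l s).take k ↔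
      (l.getD i "" = "Settled" ∧ (l.take i).count "Settled" < k)) := by
  induction l generalizing s k i with
  | nil => simp at hi
  | cons p t ih =>
    rw [settledIdx_cons]
    by_cases hp : p = "Settled"
    · rw [if_pos hp]
      cases i with
      | zero =>
        cases k with
        | zero => simp [hp]
        | succ k => rw [List.take_succ_cons]; simp [hp]
      | succ i =>
        have hi' : i < t.length := by simpa using hi
        have hcast : s + ((i + 1 : Nat) : Int) = (s + 1) + (i : Int) := by push_cast; ring
        cases k with
        | zero => simp
        | succ k =>
          rw [List.take_succ_cons, hcast, List.mem_cons, ih (s + 1) k i hi']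
          have hne : ¬((s + 1) + (i : Int) = s) := by omega
          have hc : ((p :: t).take (i + 1)).count "Settled" = (t.take i).count "Settled" + 1 := by
            simp [List.take_succ_cons, hp]
          constructor
          · rintro (h | ⟨h1, h2⟩)
            · exact absurd h hne
            · exact ⟨by simpa using h1, by rw [hc]; omega⟩
          · rintro ⟨h1, h2⟩
            right
            refine ⟨by simpa using h1, ?_⟩
            rw [hc] at h2; omega
    · rw [if_neg hp]
      cases i with
      | zero =>
        simp only [Nat.cast_zero, add_zero]
        constructor
        · intro hmem
          have := le_of_mem_settledIdx t (s + 1) _ (List.mem_of_mem_take hmem)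
          exact absurd this (by omega)
        · rintro ⟨h1, _⟩
          rw [List.getD_cons_zero] at h1
          exact absurd h1 hp
      | succ i =>
        have hi' : i < t.length := by simpa using hi
        have hcast : s + ((i + 1 : Nat) : Int) = (s + 1) + (i : Int) := by push_cast; ring
        rw [hcast, ih (s + 1) k i hi']
        simp [hp]

theorem count_take_succ (l : List String) (i : Nat) :
    (l.take (i + 1)).count "Settled" =
      (l.take i).count "Settled" + (if l.getD i "" = "Settled" then 1 else 0) := by
  rw [List.take_add_one]
  by_cases hi : i < l.length
  · have hg : l[i]? = some l[i] := List.getElem?_eq_getElem hi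
    have hgd : l.getD i "" = l[i] := by simp [List.getD_eq_getElem?_getD, hg]
    rw [hg, hgd]
    simp only [Option.toList_some, List.count_append, List.count_cons, List.count_nil,
      beq_iff_eq, Nat.zero_add]
  · have h1 : l[i]? = none := List.getElem?_eq_none (by omega)
    have hgd : l.getD i "" = "" := by simp [List.getD_eq_getElem?_getD, h1]
    rw [h1, hgd]
    simp

theorem contains_ofList_iff (L : List Int) (x : Int) :
    PySem.Set.contains (PySem.Set.ofList L) x = true ↔ x ∈ L := by
  rw [PySem.Set.contains_iff]
  exact PySem.Set.mem_ofList ..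

theorem dropL_of_mx_zero (phases : List String) :
    PySem.List.slice (settledIdx phases 0) none (some (-(0 : Int))) = [] := by
  rw [show (-(0 : Int)) = ((0 : Nat) : Int) by norm_num, PySem.List.slice_to_natCast]
  simp

theorem count_mem_take (phases : List String) (n i : Nat) (hi : i < n) (hin : i < phases.length)
    (hp : phases.getD i "" = "Settled") : 0 < (phases.take n).count "Settled" := by
  rw [List.count_pos_iff]
  rw [List.getD_eq_getElem?_getD, List.getElem?_eq_getElem hin] at hp
  simp only [Option.getD_some] at hp
  exact List.mem_take_iff_getElem.2 ⟨i, by omega, hp⟩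

-- A's copy loop produces exactly the kept indices, mapped through the two lists.
theorem foldA_eq (frames : List Int) (phases : List String) (dropL : List Int) (n : Nat) :
    (PySem.List.pyRange 0 (n : Int) 1).foldl (stepA frames phases dropL) ([], []) =
      (((List.range n).filter (fun i : Nat => !(PySem.Set.contains (PySem.Set.ofList dropL) ((i : Nat) : Int)))).map
          (fun i => frames.getD i 0),
       ((List.range n).filter (fun i : Nat => !(PySem.Set.contains (PySem.Set.ofList dropL) ((i : Nat) : Int)))).map
          (fun i => phases.getD i "")) := by
  induction n with
  | zero => simp
  | succ n ih =>
    have hc : ((n + 1 : Nat) : Int) = (n : Int) + 1 := by push_cast; ring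
    rw [hc, PySem.List.pyRange_one_succ_right (by positivity), List.foldl_append]
    simp only [List.foldl_cons, List.foldl_nil]
    rw [ih, stepA, List.range_succ]
    cases hb : PySem.Set.contains (PySem.Set.ofList dropL) (n : Int) with
    | true =>
      have hm := (contains_ofList_iff dropL (n : Int)).1 hb
      simp [hm]
    | false =>
      have hm : ¬((n : Int) ∈ dropL) := fun h => by
        rw [(contains_ofList_iff dropL (n : Int)).2 h] at hb; cases hb
      simp [hm, PySem.List.pyGetD_natCast]

-- j ≤ _cut_after's running result (the index only moves forward).
theorem le_cutAfterGo (nd : Int) (l : List String) (s j : Int) : j ≤ cutAfterGo nd l s j := by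
  induction l generalizing s j with
  | nil => simp [cutAfterGo]
  | cons p t ih =>
    simp only [cutAfterGo]
    split_ifs
    · omega
    · have := ih (s + 1) (j + 1); omega
    · have := ih s (j + 1); omega

-- Characterisation of the boundary: positions ≥ cut are exactly those whose prefix already
-- holds all nd dropped Settled frames.
theorem cutAfterGo_le_iff (nd : Int) (l : List String) (s j : Int) (k : Nat)
    (hs : s < nd) (hcnt : nd ≤ s + (l.count "Settled" : Int)) :
    (cutAfterGo nd l s j ≤ j + (k : Int) ↔ nd ≤ s + ((l.take k).count "Settled" : Int)) := by
  induction l generalizing s j k with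
  | nil => simp at hcnt; omega
  | cons p t ih =>
    by_cases hp : p = "Settled"
    · by_cases hsn : s + 1 = nd
      · simp only [cutAfterGo, if_pos hp, if_pos hsn]
        cases k with
        | zero => simp; omega
        | succ k =>
          have hct : ((p :: t).take (k + 1)).count "Settled" = (t.take k).count "Settled" + 1 := by
            simp [List.take_succ_cons, hp]
          rw [hct]
          push_cast
          constructor <;> intro <;> omega
      · simp only [cutAfterGo, if_pos hp, if_neg hsn]
        have hcnt' : nd ≤ (s + 1) + (t.count "Settled" : Int) := by
          simp only [List.count_cons, hp, beq_self_eq_true, if_true] at hcnt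
          push_cast at hcnt ⊢; omega
        cases k with
        | zero =>
          simp only [List.take_zero, List.count_nil, Nat.cast_zero, add_zero]
          have h1 := le_cutAfterGo nd t (s + 1) (j + 1)
          constructor <;> intro h <;> omega
        | succ k =>
          have := ih (s + 1) (j + 1) k (by omega) hcnt'
          have hct : ((p :: t).take (k + 1)).count "Settled" = (t.take k).count "Settled" + 1 := by
            simp [List.take_succ_cons, hp]
          rw [hct]
          push_cast at this ⊢
          constructor <;> intro h
          · have := this.1 (by omega); omega
          · have := this.2 (by omega); omega
    · simp only [cutAfterGo, if_neg hp]
      have hcnt' : nd ≤ s + (t.count "Settled" : Int) := by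
        simp only [List.count_cons] at hcnt
        simp only [beq_iff_eq] at hcnt
        rw [if_neg hp] at hcnt
        omega
      cases k with
      | zero =>
        simp only [List.take_zero, List.count_nil, Nat.cast_zero, add_zero]
        have h1 := le_cutAfterGo nd t s (j + 1)
        constructor <;> intro h <;> omega
      | succ k =>
        have := ih s (j + 1) k hs hcnt'
        have hct : ((p :: t).take (k + 1)).count "Settled" = (t.take k).count "Settled" := by
          simp [List.take_succ_cons, hp]
        rw [hct]
        push_cast at this ⊢
        constructor <;> intro h
        · have := this.1 (by omega); omega
        · have := this.2 (by omega); omega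

-- Reading a contiguous run of indices through getD is drop-then-take.
theorem map_getD_range' {α : Type} (xs : List α) (d : α) (a k : Nat) (h : a + k ≤ xs.length) :
    (List.range' a k).map (fun i => xs.getD i d) = (xs.drop a).take k := by
  apply List.ext_getElem
  · simp; omega
  · intro i h1 h2
    simp only [List.getElem_map, List.getElem_range', List.getElem_take, List.getElem_drop]
    rw [List.getD_eq_getElem?_getD, List.getElem?_eq_getElem (by simp at h1; omega)]
    simp

-- zip(frames[:k], phases) enumerated by index.
theorem zip_take_eq (frames : List Int) (phases : List String) (k : Nat)
    (hm : frames.length ≤ phases.length) :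
    (frames.take k).zip phases =
      (List.range (min k frames.length)).map (fun i => (frames.getD i 0, phases.getD i "")) := by
  apply List.ext_getElem
  · simp; omega
  · intro i h1 h2
    simp only [List.getElem_zip, List.getElem_take, List.getElem_map, List.getElem_range]
    have hi : i < frames.length := by simp at h1; omega
    have hip : i < phases.length := by omega
    rw [List.getD_eq_getElem?_getD, List.getElem?_eq_getElem hi,
      List.getD_eq_getElem?_getD, List.getElem?_eq_getElem hip]
    simp

-- ===== VERDICT (by name: the statement is the Claim_ definition above) =====
-- The prefix/suffix split of A's kept indices that B's boundary realises.
theorem main_split (frames : List Int) (phases : List String) (dropL : List Int)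
    (nd cut : Int) (hm : frames.length ≤ phases.length) (hcut0 : 0 ≤ cut)
    (Hd : ∀ i : Nat, i < frames.length →
      (((i : Int) ∈ dropL ↔
        (phases.getD i "" = "Settled" ∧ (((phases.take i).count "Settled" : Int) < nd)))))
    (Hc : ∀ k : Nat, (cut ≤ (k : Int) ↔ nd ≤ ((phases.take k).count "Settled" : Int))) :
    (PySem.List.pyRange 0 (frames.length : Int) 1).foldl (stepA frames phases dropL) ([], []) =
      (((((frames.take cut.toNat).zip phases).filter (fun fp => !(fp.2 == "Settled"))).map Prod.fst)
          ++ frames.drop cut.toNat,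
       ((((frames.take cut.toNat).zip phases).filter (fun fp => !(fp.2 == "Settled"))).map Prod.snd)
          ++ (phases.drop cut.toNat).take (frames.length - cut.toNat)) := by
  set n := frames.length with hn
  set cutN : Nat := cut.toNat with hcutN_def
  have hcutN : (cutN : Int) = cut := Int.toNat_of_nonneg hcut0
  set c : Nat := min cutN n with hc_def
  have hkey : ∀ i : Nat, i < n →
      (((i : Int) ∈ dropL) ↔ (phases.getD i "" = "Settled" ∧ i < cutN)) := by
    intro i hi
    rw [Hd i hi]
    have h1 := Hc i
    constructor
    · rintro ⟨hs, hlt⟩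
      refine ⟨hs, ?_⟩
      have : ¬ (cut ≤ (i : Int)) := fun h => by have := h1.1 h; omega
      omega
    · rintro ⟨hs, hic⟩
      refine ⟨hs, ?_⟩
      have : ¬ (nd ≤ ((phases.take i).count "Settled" : Int)) := fun h => by
        have := h1.2 h; omega
      omega
  rw [foldA_eq, zip_take_eq frames phases cutN hm, List.filter_map, ← hc_def]
  have hsplit : List.range n = List.range c ++ List.range' c (n - c) := by
    rw [show n = c + (n - c) by omega, List.range_eq_range', List.range_eq_range',
      ← List.range'_append]
    simp
  rw [hsplit, List.filter_append, List.map_append, List.map_append]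
  -- prefix: drop-membership is exactly "is Settled"
  have hpre : ∀ i ∈ List.range c,
      (!(PySem.Set.contains (PySem.Set.ofList dropL) ((i : Nat) : Int))) =
        (((fun fp => !(fp.2 == "Settled")) ∘ fun i => (frames.getD i 0, phases.getD i "")) i) := by
    intro i hi
    rw [List.mem_range] at hi
    have hic : i < cutN := by omega
    have hin : i < n := by omega
    have hk := hkey i hin
    by_cases hs : phases.getD i "" = "Settled"
    · have hbe : (phases.getD i "" == "Settled") = true := beq_iff_eq.mpr hs
      rw [(contains_ofList_iff _ _).2 (hk.2 ⟨hs, hic⟩), Function.comp_apply, hbe]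
    · have hmem : ¬ ((i : Int) ∈ dropL) := fun h => hs (hk.1 h).1
      have hf : PySem.Set.contains (PySem.Set.ofList dropL) ((i : Nat) : Int) = false := by
        cases hb : PySem.Set.contains (PySem.Set.ofList dropL) ((i : Nat) : Int)
        · rfl
        · exact absurd ((contains_ofList_iff _ _).1 hb) hmem
      have hbe : (phases.getD i "" == "Settled") = false := beq_eq_false_iff_ne.mpr hs
      rw [hf, Function.comp_apply, hbe]
  rw [List.filter_congr hpre]
  -- suffix: nothing at or past the boundary is dropped
  have hsuf : (List.range' c (n - c)).filter
      (fun i : Nat => !(PySem.Set.contains (PySem.Set.ofList dropL) ((i : Nat) : Int))) =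
      List.range' c (n - c) := by
    apply List.filter_eq_self.mpr
    intro i hi
    have h2 := List.mem_range'_1.mp hi
    have hicut : cutN ≤ i := by omega
    have hin : i < n := by omega
    have hmem : ¬ ((i : Int) ∈ dropL) := fun h => by
      have := (hkey i hin).1 h; omega
    have hf : PySem.Set.contains (PySem.Set.ofList dropL) ((i : Nat) : Int) = false := by
      cases hb : PySem.Set.contains (PySem.Set.ofList dropL) ((i : Nat) : Int)
      · rfl
      · exact absurd ((contains_ofList_iff _ _).1 hb) hmem
    rw [hf]; rfl
  rw [hsuf]
  have hf1 : (List.range' c (n - c)).map (fun i => frames.getD i 0) = frames.drop cutN := by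
    rw [map_getD_range' frames 0 c (n - c) (by omega)]
    rcases Nat.le_total cutN n with h | h
    · rw [show c = cutN by omega]
      exact List.take_of_length_le (by simp; omega)
    · rw [show c = n by omega, List.drop_eq_nil_of_le (le_of_eq hn.symm),
        List.drop_eq_nil_of_le (by omega)]
      simp
  have hf2 : (List.range' c (n - c)).map (fun i => phases.getD i "") =
      (phases.drop cutN).take (n - cutN) := by
    rw [map_getD_range' phases "" c (n - c) (by omega)]
    rcases Nat.le_total cutN n with h | h
    · rw [show c = cutN by omega]
    · rw [show c = n by omega, show n - n = 0 by omega, show n - cutN = 0 by omega]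
      simp
  rw [hf1, hf2, List.map_map, List.map_map]
  rfl

theorem cap_settled_frames_spec : Claim_unchanged_cap_settled_frames := by
  intro frames phases mx _hdom hpre
  unfold Spec_cap_settled_frames
  intro hD
  obtain ⟨hmx, hlen⟩ := hpre
  have hcnt : PySem.List.count phases "Settled" = phases.count "Settled" := PySem.List.count_eq ..
  rw [portA_eq, portB_eq, hcnt, length_settledIdx]
  by_cases hle : ((phases.count "Settled" : Nat) : Int) ≤ mx
  · rw [if_pos hle, if_pos (by omega)]
  · rw [if_neg hle, if_neg (by omega)]
    set n := frames.length with hn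
    have hm : n ≤ phases.length := by
      rcases hlen with h | h
      · exact h
      · exact absurd h hle
    set nd : Int := ((phases.count "Settled" : Nat) : Int) - mx with hnd_def
    have hnd : 0 < nd := by omega
    set cut : Int := cutAfterGo nd phases 0 0 with hcut_def
    have hcut0 : (0 : Int) ≤ cut := le_cutAfterGo nd phases 0 0
    have Hc : ∀ k : Nat, (cut ≤ (k : Int) ↔ nd ≤ ((phases.take k).count "Settled" : Int)) := by
      intro k
      have := cutAfterGo_le_iff nd phases 0 0 k hnd (by omega)
      simpa using this
    have Hd : ∀ i : Nat, i < n →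
        (((i : Int) ∈ PySem.List.slice (settledIdx phases 0) none (some (-mx))) ↔
          (phases.getD i "" = "Settled" ∧ (((phases.take i).count "Settled" : Int) < nd))) := by
      intro i hi
      rcases eq_or_lt_of_le hmx with hmx0 | hmxpos
      · rw [← hmx0, dropL_of_mx_zero]
        simp only [List.not_mem_nil, false_iff, not_and]
        intro hp
        exfalso
        exact hD ⟨hmx0.symm, count_mem_take phases frames.length i hi (by omega) hp⟩
      · have hk0 : ((mx.toNat : Nat) : Int) = mx := Int.toNat_of_nonneg hmx
        have hk0pos : 0 < mx.toNat := by omega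
        rw [show (-mx) = -((mx.toNat : Nat) : Int) by omega,
          PySem.List.slice_to_neg_natCast _ _ hk0pos, length_settledIdx]
        have := mem_take_settledIdx phases 0 (phases.count "Settled" - mx.toNat) i (by omega)
        rw [zero_add] at this
        rw [this]
        have hcle : mx.toNat ≤ phases.count "Settled" := by omega
        exact and_congr_right fun _ => by omega
    rw [main_split frames phases _ nd cut hm hcut0 Hd Hc,
      PySem.List.slice_to frames hcut0, PySem.List.slice_from frames hcut0,
      PySem.List.slice_toNat phases hcut0 (by positivity)]
    simp
    omega

theorem cap_settled_frames_changed : Claim_changed_cap_settled_frames := by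
  unfold Claim_changed_cap_settled_frames; decide

theorem cap_settled_frames_tight : Claim_exact_cap_settled_frames := by
  intro frames phases mx _hdom hpre hD
  obtain ⟨hmx0, hsb⟩ := hD
  subst hmx0
  obtain ⟨_, hlen⟩ := hpre
  set n := frames.length with hn
  have hcle : (phases.take n).count "Settled" ≤ phases.count "Settled" :=
    (List.take_sublist _ _).count_le _
  have hm : n ≤ phases.length := by
    rcases hlen with h | h
    · exact h
    · exfalso; omega
  have hcnt : PySem.List.count phases "Settled" = phases.count "Settled" := PySem.List.count_eq ..
  intro heq
  rw [portA_eq, portB_eq, hcnt, length_settledIdx] at heq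
  have hgt : ¬ ((phases.count "Settled" : Nat) : Int) ≤ (0 : Int) := by omega
  rw [if_neg hgt, if_neg (by omega), dropL_of_mx_zero, foldA_eq] at heq
  set nd : Int := ((phases.count "Settled" : Nat) : Int) - 0 with hnd_def
  set cut : Int := cutAfterGo nd phases 0 0 with hcut_def
  have hcut0 : (0 : Int) ≤ cut := le_cutAfterGo nd phases 0 0
  set cutN : Nat := cut.toNat with hcutN_def
  have hcutN : (cutN : Int) = cut := Int.toNat_of_nonneg hcut0
  have Hc : ∀ k : Nat, (cut ≤ (k : Int) ↔ nd ≤ ((phases.take k).count "Settled" : Int)) := by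
    intro k
    have := cutAfterGo_le_iff nd phases 0 0 k (by omega) (by omega)
    simpa using this
  -- a Settled frame inside the copied range, strictly before the boundary
  obtain ⟨i0, hi0, hget⟩ := List.mem_take_iff_getElem.1 (List.count_pos_iff.1 hsb)
  have hgetD : phases.getD i0 "" = "Settled" := by
    rw [List.getD_eq_getElem?_getD, List.getElem?_eq_getElem (by omega)]
    simpa using hget
  have hc1 : (phases.take (i0 + 1)).count "Settled" = (phases.take i0).count "Settled" + 1 := by
    rw [count_take_succ, if_pos hgetD]
  have hle1 : (phases.take (i0 + 1)).count "Settled" ≤ phases.count "Settled" :=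
    (List.take_sublist _ _).count_le _
  have hi0cut : i0 < cutN := by
    have hnotc : ¬ (cut ≤ (i0 : Int)) := fun h => by
      have := (Hc i0).1 h; omega
    omega
  -- A keeps everything; B's first list is strictly shorter
  have hfilt : (List.range n).filter
      (fun i : Nat => !(PySem.Set.contains (PySem.Set.ofList ([] : List Int)) ((i : Nat) : Int))) =
      List.range n := by
    apply List.filter_eq_self.mpr
    intro i _
    have hf : PySem.Set.contains (PySem.Set.ofList ([] : List Int)) ((i : Nat) : Int) = false := by
      cases hb : PySem.Set.contains (PySem.Set.ofList ([] : List Int)) ((i : Nat) : Int)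
      · rfl
      · exact absurd ((contains_ofList_iff _ _).1 hb) (List.not_mem_nil)
    rw [hf]; rfl
  rw [hfilt, PySem.List.slice_to frames hcut0, PySem.List.slice_from frames hcut0,
    zip_take_eq frames phases cutN hm, List.filter_map] at heq
  have hL := congrArg (fun r : List Int × List String => r.1.length) heq
  simp only [List.length_append, List.length_map, List.length_range, List.length_drop] at hL
  set c : Nat := min cutN n with hc_def
  have hbe : (phases.getD i0 "" == "Settled") = true := beq_iff_eq.mpr hgetD
  have hmemw : ∃ x ∈ List.range c,
      ¬ ((((fun fp => !(fp.2 == "Settled")) ∘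
          (fun i => ((frames.getD i 0 : Int), (phases.getD i "" : String)))) x) = true) := by
    refine ⟨i0, by rw [List.mem_range]; omega, ?_⟩
    rw [Function.comp_apply, hbe]
    simp
  have hflt := List.length_filter_lt_length_iff_exists.mpr hmemw
  rw [List.length_range] at hflt
  omega
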